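-- pv_equiv track=rewrite | github.com/TfedUD/Voxel_Placer_github | Person.py | dominant_in_list
-- ===== SOURCE A (Python) =====
-- def dominant_in_list(mylist):
--
--     # making the counters_dict
--     counters_dict = {}
--     for item in mylist:
--         counters_dict[item] = 0
--
--     # Counting
--     for item in mylist:
--         counters_dict[item] += 1
--
--     max_counter = 0
--
--     for item in counters_dict:
--         if counters_dict[item] >= max_counter:
--             max_counter = counters_dict[item]
--
--     dominent_items = []
--
--     for item in counters_dict:
--         if counters_dict[item] == max_counter:
--             dominent_items.append(item)
--
--     ###### find a better evaluation!
--     ###### based on better moves!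
--     random_dominent = dominent_items[0]
--
--     for item in mylist:
--         if item in dominent_items:
--             the_item = item
--     return the_item
-- ===== SOURCE B (Python) =====
-- def dominant_in_list(mylist):
--     # One counting pass, then one reverse scan keeping the first element (from
--     # the right) whose count strictly beats the best seen so far.
--     counts = {}
--     for x in mylist:
--         counts[x] = counts.get(x, 0) + 1
--     best = mylist[-1]
--     for x in reversed(mylist):
--         if counts[x] > counts[best]:
--             best = x
--     return best
-- ===== Notes on version B (the rewrite author's own statement) =====
-- stated objective: simpler
-- what changed: A builds a zeroed dict, recounts, scans the keys twice for the max count and the dominant-value list, then rescans the whole input with an 'item in dominent_items' list-membership test per element; B does one counting pass and one reverse scan that keeps the first element from the right whose count strictly exceeds the running best.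
-- outside the precondition, e.g. on dominant_in_list([]): A raises IndexError, B raises IndexError
import Mathlib
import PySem

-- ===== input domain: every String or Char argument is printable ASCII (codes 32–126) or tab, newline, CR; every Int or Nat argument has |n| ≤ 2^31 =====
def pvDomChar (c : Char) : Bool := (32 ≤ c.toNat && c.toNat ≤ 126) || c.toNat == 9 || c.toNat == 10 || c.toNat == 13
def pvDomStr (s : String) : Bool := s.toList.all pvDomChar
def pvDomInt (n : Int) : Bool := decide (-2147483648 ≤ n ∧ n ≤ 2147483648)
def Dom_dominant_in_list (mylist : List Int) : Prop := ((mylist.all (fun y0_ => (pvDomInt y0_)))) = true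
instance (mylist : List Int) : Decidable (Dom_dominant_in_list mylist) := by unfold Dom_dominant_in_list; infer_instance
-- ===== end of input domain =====

-- B replaces A's four dictionary/membership passes by one counting pass plus one
-- reverse scan keeping the first element (from the right) whose count strictly
-- exceeds the running best — same return value, no inner membership scan.

-- ===== PORT A =====
def dominant_in_list (mylist : List Int) : Int :=
  -- counters_dict = {}; for item in mylist: counters_dict[item] = 0
  let d0 : PySem.Dict Int Int := mylist.foldl (fun d item => d.insert item 0) PySem.Dict.empty
  -- for item in mylist: counters_dict[item] += 1   (item is always a key here, so the
  -- KeyError branch of += is unreachable; modify with default 0 is exact)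
  let d := mylist.foldl (fun d item => d.modify item 0 (fun c => c + 1)) d0
  -- max_counter = 0; for item in counters_dict: if counters_dict[item] >= max_counter: …
  let maxc := d.keys.foldl (fun m item => if d.getD item 0 ≥ m then d.getD item 0 else m) 0
  -- dominent_items = []; for item in counters_dict: if counters_dict[item] == max_counter: append
  let dom := d.keys.foldl (fun acc item => if d.getD item 0 == maxc then acc ++ [item] else acc) ([] : List Int)
  -- random_dominent = dominent_items[0] reads dom[0] and never uses it:
  -- it raises IndexError exactly when mylist = [], which Pre_ excludes
  -- for item in mylist: if item in dominent_items: the_item = item; return the_item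
  -- (the_item starts unbound; for mylist ≠ [] it is always assigned, 0 is never returned)
  mylist.foldl (fun t item => if dom.contains item then item else t) 0

-- ===== PORT B =====
def dominant_in_list_alt (mylist : List Int) : Int :=
  -- counts = {}; for x in mylist: counts[x] = counts.get(x, 0) + 1
  let counts : PySem.Dict Int Int := mylist.foldl (fun d x => d.insert x (d.getD x 0 + 1)) PySem.Dict.empty
  -- best = mylist[-1]   (IndexError exactly when mylist = [], excluded by Pre_)
  let best := (PySem.List.pyGet? mylist (-1)).getD 0
  -- for x in reversed(mylist): if counts[x] > counts[best]: best = x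
  mylist.reverse.foldl (fun b x => if counts.getD x 0 > counts.getD b 0 then x else b) best

-- ===== PRECONDITION & SPEC =====
-- Pre_ excludes only the empty list, on which A raises IndexError (dominent_items[0]).
def Pre_dominant_in_list (mylist : List Int) : Prop := mylist ≠ []
instance (mylist : List Int) : Decidable (Pre_dominant_in_list mylist) := by unfold Pre_dominant_in_list; infer_instance
def pvWitness_dominant_in_list : List Int := [1, 2, 2, 1, 3]
def Spec_dominant_in_list (mylist : List Int) (out : Int) : Prop := out = dominant_in_list_alt mylist
instance (mylist : List Int) (out : Int) : Decidable (Spec_dominant_in_list mylist out) := by unfold Spec_dominant_in_list; infer_instance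

-- ===== CLAIM (what is proved, stated in full; the proofs are below) =====
def Claim_equal_dominant_in_list : Prop := ∀ (mylist : List Int), Dom_dominant_in_list mylist → Pre_dominant_in_list mylist → Spec_dominant_in_list mylist (dominant_in_list mylist)

-- ===== LEMMAS AND PROOFS =====

-- A's final loop keeps the LAST satisfying element: it is the first satisfying
-- element of the reversed list.
lemma foldl_keep_sat (p : Int → Bool) : ∀ (l : List Int) (t0 : Int),
    l.foldl (fun t x => if p x then x else t) t0 = (l.reverse.find? p).getD t0 := by
  intro l
  induction l with
  | nil => intro t0; simp
  | cons a l ih =>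
    intro t0
    simp only [List.foldl_cons, List.reverse_cons, List.find?_append, ih]
    cases h : l.reverse.find? p with
    | some y => simp
    | none => cases hp : p a <;> simp [List.find?, hp]

-- a foldl max is attained (by the seed or by a list element)
lemma foldl_max_attains : ∀ (t : List Int) (a : Int), t.foldl max a = a ∨ t.foldl max a ∈ t := by
  intro t
  induction t with
  | nil => intro a; left; rfl
  | cons b t ih =>
    intro a
    simp only [List.foldl_cons, List.mem_cons]
    rcases ih (max a b) with h | h
    · rw [h]
      rcases max_choice a b with hm | hm
      · exact Or.inl hm
      · exact Or.inr (Or.inl hm)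
    · exact Or.inr (Or.inr h)

-- B's strict-improvement scan returns the first element (seed included) whose key
-- value reaches the maximum key value of seed and list.
lemma foldl_argmax (c : Int → Int) : ∀ (xs : List Int) (b0 : Int),
    xs.foldl (fun b x => if c x > c b then x else b) b0
      = (((b0 :: xs).find? (fun x => decide ((xs.map c).foldl max (c b0) ≤ c x))).getD b0) := by
  intro xs
  induction xs with
  | nil => intro b0; simp [List.find?]
  | cons a xs ih =>
    intro b0
    by_cases h : c a > c b0
    · have hM : ((a :: xs).map c).foldl max (c b0) = (xs.map c).foldl max (c a) := by
        simp only [List.map_cons, List.foldl_cons]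
        rw [max_eq_right (le_of_lt h)]
      have hle := PySem.List.le_foldl_max (xs.map c) (c a)
      rw [List.foldl_cons, if_pos h, ih a, hM]
      have hpb0 : ¬ ((xs.map c).foldl max (c a) ≤ c b0) := by
        have := hle.1; omega
      have hskip : ((b0 :: a :: xs).find? (fun x => decide ((xs.map c).foldl max (c a) ≤ c x)))
          = ((a :: xs).find? (fun x => decide ((xs.map c).foldl max (c a) ≤ c x))) :=
        List.find?_cons_of_neg (by simpa using hpb0)
      rw [hskip]
      have hsome : (((a :: xs).find? (fun x => decide ((xs.map c).foldl max (c a) ≤ c x))).isSome) := by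
        rw [List.find?_isSome]
        rcases foldl_max_attains (xs.map c) (c a) with hat | hat
        · exact ⟨a, List.mem_cons_self, by simp [hat]⟩
        · rcases List.mem_map.mp hat with ⟨y, hy, hcy⟩
          exact ⟨y, List.mem_cons_of_mem _ hy, by simp [hcy]⟩
      cases hf : ((a :: xs).find? (fun x => decide ((xs.map c).foldl max (c a) ≤ c x))) with
      | some y => simp
      | none => rw [hf] at hsome; simp at hsome
    · have hab : c a ≤ c b0 := by omega
      have hM : ((a :: xs).map c).foldl max (c b0) = (xs.map c).foldl max (c b0) := by
        simp only [List.map_cons, List.foldl_cons]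
        rw [max_eq_left hab]
      rw [List.foldl_cons, if_neg h, ih b0, hM]
      by_cases hp : (xs.map c).foldl max (c b0) ≤ c b0
      · rw [List.find?_cons_of_pos (by simpa using hp), List.find?_cons_of_pos (by simpa using hp)]
      · have hpa : ¬ ((xs.map c).foldl max (c b0) ≤ c a) := by omega
        rw [List.find?_cons_of_neg (by simpa using hp), List.find?_cons_of_neg (by simpa using hp),
            List.find?_cons_of_neg (by simpa using hpa)]

-- the insert-0 pass leaves every count at 0
lemma getD_foldl_insert_zero : ∀ (l : List Int) (d : PySem.Dict Int Int),
    (∀ w, d.getD w 0 = 0) → ∀ v, (l.foldl (fun d item => d.insert item 0) d).getD v 0 = 0 := by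
  intro l
  induction l with
  | nil => intro d hd v; exact hd v
  | cons a l ih =>
    intro d hd v
    refine ih _ (fun w => ?_) v
    by_cases hw : w = a
    · simp [hw, PySem.Dict.getD_insert_self]
    · rw [PySem.Dict.getD_insert_of_ne _ _ _ hw]
      exact hd w

-- find? only looks at the listed elements
lemma find?_congr_mem {α : Type} (p q : α → Bool) : ∀ (l : List α),
    (∀ x ∈ l, p x = q x) → l.find? p = l.find? q := by
  intro l
  induction l with
  | nil => intro _; rfl
  | cons a l ih =>
    intro h
    cases hq : q a with
    | true =>
      rw [List.find?_cons_of_pos (by rw [h a List.mem_cons_self]; exact hq),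
          List.find?_cons_of_pos hq]
    | false =>
      rw [List.find?_cons_of_neg (by simp [h a List.mem_cons_self, hq]),
          List.find?_cons_of_neg (by simp [hq]),
          ih (fun x hx => h x (List.mem_cons_of_mem _ hx))]

-- ===== VERDICT (by name: the statement is the Claim_ definition above) =====
theorem dominant_in_list_spec : Claim_equal_dominant_in_list := by
  intro l _ hne
  unfold Spec_dominant_in_list
  obtain ⟨b0, xs, hrev⟩ : ∃ b0 xs, l.reverse = b0 :: xs := by
    cases h : l.reverse with
    | nil => exact absurd (List.reverse_eq_nil_iff.mp h) hne
    | cons b t => exact ⟨b, t, rfl⟩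
  have hmem : ∀ x : Int, x ∈ b0 :: xs ↔ x ∈ l := by
    intro x; rw [← hrev, List.mem_reverse]
  have hb0l : b0 ∈ l := (hmem b0).mp List.mem_cons_self
  have hd0 : ∀ v : Int,
      ((l.foldl (fun d item => d.insert item 0) (PySem.Dict.empty : PySem.Dict Int Int))).getD v 0 = 0 :=
    getD_foldl_insert_zero l _ (fun w => by simp [pysem])
  have hd : ∀ v : Int,
      ((l.foldl (fun d item => d.modify item 0 (fun c => c + 1))
        (l.foldl (fun d item => d.insert item 0) (PySem.Dict.empty : PySem.Dict Int Int)))).getD v 0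
        = (List.count v l : Int) := by
    intro v; rw [PySem.Dict.getD_foldl_modify_add_one, hd0, zero_add]
  have hKmem : ∀ x : Int,
      x ∈ PySem.Set.update (PySem.Set.update (PySem.Dict.empty : PySem.Dict Int Int).keys l) l ↔ x ∈ l := by
    intro x; simp [PySem.Set.mem_update]
  have hcpos : ∀ x ∈ l, (1:Int) ≤ (List.count x l : Int) := by
    intro x hx; have := List.count_pos_iff.mpr hx; omega
  have hmax_le : ∀ x ∈ l, (List.count x l : Int) ≤
      ((PySem.Set.update (PySem.Set.update (PySem.Dict.empty : PySem.Dict Int Int).keys l) l).map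
        (fun x => (List.count x l : Int))).foldl max 0 := by
    intro x hx
    exact (PySem.List.le_foldl_max _ 0).2 _ (List.mem_map.mpr ⟨x, (hKmem x).mpr hx, rfl⟩)
  have hmax_att :
      (((PySem.Set.update (PySem.Set.update (PySem.Dict.empty : PySem.Dict Int Int).keys l) l).map
        (fun x => (List.count x l : Int))).foldl max 0) = 0 ∨
      ∃ x ∈ l, (((PySem.Set.update (PySem.Set.update (PySem.Dict.empty : PySem.Dict Int Int).keys l) l).map
        (fun x => (List.count x l : Int))).foldl max 0) = (List.count x l : Int) := by
    rcases foldl_max_attains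
        ((PySem.Set.update (PySem.Set.update (PySem.Dict.empty : PySem.Dict Int Int).keys l) l).map
          (fun x => (List.count x l : Int))) 0 with h | h
    · exact Or.inl h
    · rcases List.mem_map.mp h with ⟨y, hy, hcy⟩
      exact Or.inr ⟨y, (hKmem y).mp hy, hcy.symm⟩
  have hM2_le : ∀ x ∈ b0 :: xs, (List.count x l : Int) ≤
      (xs.map (fun x => (List.count x l : Int))).foldl max (List.count b0 l : Int) := by
    intro x hx
    rcases List.mem_cons.mp hx with rfl | hx'
    · exact (PySem.List.le_foldl_max _ _).1
    · exact (PySem.List.le_foldl_max _ _).2 _ (List.mem_map.mpr ⟨x, hx', rfl⟩)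
  have hM2_att : ∃ x ∈ b0 :: xs,
      (xs.map (fun x => (List.count x l : Int))).foldl max (List.count b0 l : Int) = (List.count x l : Int) := by
    rcases foldl_max_attains (xs.map (fun x => (List.count x l : Int))) (List.count b0 l : Int) with h | h
    · exact ⟨b0, List.mem_cons_self, h⟩
    · rcases List.mem_map.mp h with ⟨y, hy, hcy⟩
      exact ⟨y, List.mem_cons_of_mem _ hy, hcy.symm⟩
  have hMeq :
      (((PySem.Set.update (PySem.Set.update (PySem.Dict.empty : PySem.Dict Int Int).keys l) l).map
        (fun x => (List.count x l : Int))).foldl max 0)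
      = (xs.map (fun x => (List.count x l : Int))).foldl max (List.count b0 l : Int) := by
    obtain ⟨y, hy, hcy⟩ := hM2_att
    have h1 := hmax_le y ((hmem y).mp hy)
    have h2 := hM2_le b0 List.mem_cons_self
    have h3 := hcpos b0 hb0l
    rcases hmax_att with h0 | ⟨k, hk, hck⟩
    · have h4 := hM2_le y hy; omega
    · have h4 := hM2_le k ((hmem k).mpr hk); omega
  have hcongr : ∀ x ∈ b0 :: xs,
      (((PySem.Set.update (PySem.Set.update (PySem.Dict.empty : PySem.Dict Int Int).keys l) l).filter
          (fun k => ((List.count k l : Int) ==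
            (((PySem.Set.update (PySem.Set.update (PySem.Dict.empty : PySem.Dict Int Int).keys l) l).map
              (fun x => (List.count x l : Int))).foldl max 0)))).contains x)
        = decide ((xs.map (fun x => (List.count x l : Int))).foldl max (List.count b0 l : Int)
            ≤ (List.count x l : Int)) := by
    intro x hx
    have hxl : x ∈ l := (hmem x).mp hx
    rw [Bool.eq_iff_iff]
    simp only [List.contains_iff_mem, List.mem_filter, beq_iff_eq, decide_eq_true_eq]
    constructor
    · rintro ⟨-, hcx⟩
      have h1 := hMeq
      omega
    · intro hge
      refine ⟨(hKmem x).mpr hxl, ?_⟩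
      have h1 := hM2_le x hx
      have h2 := hMeq
      omega
  have hA : dominant_in_list l
      = (((b0 :: xs).find? (fun x => decide
          ((xs.map (fun x => (List.count x l : Int))).foldl max (List.count b0 l : Int)
            ≤ (List.count x l : Int)))).getD 0) := by
    simp only [dominant_in_list]
    simp only [hd]
    simp only [PySem.Dict.keys_foldl_modify, PySem.Dict.keys_foldl_insert]
    have hfun : (fun (m item : Int) => if (List.count item l : Int) ≥ m then (List.count item l : Int) else m)
        = fun (m item : Int) => max m (List.count item l : Int) := by
      funext m item; rw [max_def]
    rw [hfun, ← List.foldl_map (f := fun x : Int => (List.count x l : Int)) (g := max)]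
    rw [PySem.List.foldl_append_if]
    simp only [List.nil_append, List.map_id']
    rw [foldl_keep_sat, hrev]
    rw [find?_congr_mem _ _ _ hcongr]
  have hB : dominant_in_list_alt l
      = (((b0 :: xs).find? (fun x => decide
          ((xs.map (fun x => (List.count x l : Int))).foldl max (List.count b0 l : Int)
            ≤ (List.count x l : Int)))).getD b0) := by
    simp only [dominant_in_list_alt]
    rw [PySem.Dict.foldl_insert_getD_add_one_eq_counter]
    simp only [PySem.Dict.getD_counter]
    rw [PySem.List.pyGet?_neg_one, ← List.head?_reverse, hrev]
    simp only [List.head?_cons, Option.getD_some, List.foldl_cons]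
    rw [if_neg (lt_irrefl _)]
    exact foldl_argmax (fun x => (List.count x l : Int)) xs b0
  rw [hA, hB]
  have hsome : (((b0 :: xs).find? (fun x => decide
      ((xs.map (fun x => (List.count x l : Int))).foldl max (List.count b0 l : Int)
        ≤ (List.count x l : Int)))).isSome) := by
    rw [List.find?_isSome]
    obtain ⟨y, hy, hcy⟩ := hM2_att
    exact ⟨y, hy, by simp [hcy]⟩
  cases hf : ((b0 :: xs).find? (fun x => decide
      ((xs.map (fun x => (List.count x l : Int))).foldl max (List.count b0 l : Int)
        ≤ (List.count x l : Int)))) with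
  | some y => simp
  | none => rw [hf] at hsome; simp at hsome
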